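-- pv_equiv track=rewrite | github.com/heckerdavid/data-structures-and-algorithms | python/leet_code/two_pluses.py | calc_max_area
-- ===== SOURCE A (Python) =====
-- def calc_max_area(row, col, grid):
--     left = max_run(row, col, grid, "left")
--     right = max_run(row, col, grid, "right")
--     bottom = max_run(row, col, grid, "bottom")
--     top = max_run(row, col, grid, "top")
--     run_length = min(left, right, top, bottom)
--     list_of_all_possible_crosses = []
--     for i in range(0, run_length + 1):
--         area = 1 + i * 4
--         indexs = build_index_list(row, col, i)
--         list_of_all_possible_crosses.append((area,indexs))
--
--     return list_of_all_possible_crosses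
--
-- def max_run(row, col, grid, direction):
--     current_row = row
--     current_col = col
--     count = 0
--     while current_col - 1 >= 0 and current_col + 1 < len(grid[0]) and current_row + 1 < len(grid) and current_row -1 >= 0 and grid[current_row][current_col] == 'G':
--         if direction == 'left':
--             current_col -= 1
--         elif direction == 'right':
--             current_col += 1
--         elif direction == 'top':
--             current_row += 1
--         elif direction == 'bottom':
--             current_row -= 1
--         if grid[current_row][current_col] == 'G':
--             count += 1
--
--     return count
--
-- def build_index_list(row, col, run_length):
--     index_list = []
--     for i in range(1, run_length + 1):
--         index_list.append((row, col + i))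
--         index_list.append((row, col - i))
--         index_list.append((row + i, col))
--         index_list.append((row - i, col))
--
--     index_list.append((row, col))
--
--     return index_list
-- ===== SOURCE B (Python) =====
-- def calc_max_area(row, col, grid):
--     left = _run(row, col, grid, 0, -1)
--     right = _run(row, col, grid, 0, 1)
--     bottom = _run(row, col, grid, -1, 0)
--     top = _run(row, col, grid, 1, 0)
--     run_length = min(left, right, top, bottom)
--     crosses = []
--     arms = []
--     for i in range(run_length + 1):
--         crosses.append((1 + 4 * i, arms + [(row, col)]))
--         arms.append((row, col + i + 1))
--         arms.append((row, col - i - 1))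
--         arms.append((row + i + 1, col))
--         arms.append((row - i - 1, col))
--     return crosses
--
-- def _run(row, col, grid, dr, dc):
--     r, c, count = row, col, 0
--     while 1 <= c and c <= len(grid[0]) - 2 and 1 <= r and r <= len(grid) - 2 and grid[r][c] == 'G':
--         r += dr
--         c += dc
--         if grid[r][c] == 'G':
--             count += 1
--     return count
-- ===== Notes on version B (the rewrite author's own statement) =====
-- stated objective: simpler
-- what changed: The per-iteration rebuild of the whole index list (build_index_list called afresh for every i, O(run^2) appends) is replaced by one accumulating pass that maintains the growing arm list and snapshots it with the center appended, and the four direction-specific branches of max_run are replaced by a single walker parametrised by a (dr,dc) offset; total work drops from quadratic to linear in run_length.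
import Mathlib
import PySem

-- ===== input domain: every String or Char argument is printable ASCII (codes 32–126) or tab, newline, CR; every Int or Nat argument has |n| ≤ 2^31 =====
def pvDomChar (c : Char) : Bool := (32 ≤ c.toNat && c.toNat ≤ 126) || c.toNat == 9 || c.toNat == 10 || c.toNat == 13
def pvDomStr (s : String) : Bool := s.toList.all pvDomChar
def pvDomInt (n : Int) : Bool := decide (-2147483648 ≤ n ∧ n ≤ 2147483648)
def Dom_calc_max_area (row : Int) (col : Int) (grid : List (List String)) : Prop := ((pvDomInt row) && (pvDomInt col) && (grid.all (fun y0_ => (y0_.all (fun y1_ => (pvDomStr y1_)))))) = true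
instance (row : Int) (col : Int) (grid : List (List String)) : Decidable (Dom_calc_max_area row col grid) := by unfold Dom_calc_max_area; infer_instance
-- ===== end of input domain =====

-- B replaces the per-i rebuild of the index list by one accumulating pass over the arm
-- coordinates and folds the four direction branches of max_run into one (dr,dc) walker
-- (objective: simpler, linear instead of quadratic list construction).

-- ===== PORT A =====
-- grid[r][c] as an Option (none = IndexError)
def pvCell (grid : List (List String)) (r c : Int) : Option String :=
  (PySem.List.pyGet? grid r).bind (fun rw => PySem.List.pyGet? rw c)

-- the while-loop of Python's max_run; fuel is an upper bound on the number of
-- iterations (the walker moves one step per iteration in a fixed direction, so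
-- it leaves the [1,n-2]×[1,m-2] band after at most n+m steps)
def pvMaxRunLoopA (grid : List (List String)) (dir : String) :
    Nat → Int → Int → Int → Int
  | 0, _, _, count => count
  | fuel+1, r, c, count =>
    if 0 ≤ c - 1 ∧ c + 1 < ((grid.headD []).length : Int) ∧ r + 1 < (grid.length : Int) ∧ 0 ≤ r - 1 ∧ pvCell grid r c = some "G" then
      let rc : Int × Int :=
        if dir == "left" then (r, c - 1)
        else if dir == "right" then (r, c + 1)
        else if dir == "top" then (r + 1, c)
        else if dir == "bottom" then (r - 1, c)
        else (r, c)
      let count' := if pvCell grid rc.1 rc.2 = some "G" then count + 1 else count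
      pvMaxRunLoopA grid dir fuel rc.1 rc.2 count'
    else count

def pvMaxRunA (row col : Int) (grid : List (List String)) (dir : String) : Int :=
  pvMaxRunLoopA grid dir (grid.length + (grid.headD []).length + 1) row col 0

def pvBuildIndexList (row col run_length : Int) : List (Int × Int) :=
  ((PySem.List.pyRange 1 (run_length + 1) 1).foldl
    (fun acc i => acc ++ [(row, col + i), (row, col - i), (row + i, col), (row - i, col)]) [])
  ++ [(row, col)]

def calc_max_area (row : Int) (col : Int) (grid : List (List String)) : List (Int × (List (Int × Int))) :=
  let left := pvMaxRunA row col grid "left"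
  let right := pvMaxRunA row col grid "right"
  let bottom := pvMaxRunA row col grid "bottom"
  let top := pvMaxRunA row col grid "top"
  let run_length := min (min (min left right) top) bottom
  (PySem.List.pyRange 0 (run_length + 1) 1).foldl
    (fun acc i => acc ++ [(1 + i * 4, pvBuildIndexList row col i)]) []

-- ===== PORT B =====
-- B's _run: one walker parametrised by the direction offset (dr,dc); same fuel bound
def pvRunLoopB (grid : List (List String)) (dr dc : Int) :
    Nat → Int → Int → Int → Int
  | 0, _, _, count => count
  | fuel+1, r, c, count =>
    if 1 ≤ c ∧ c ≤ ((grid.headD []).length : Int) - 2 ∧ 1 ≤ r ∧ r ≤ (grid.length : Int) - 2 ∧ pvCell grid r c = some "G" then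
      let r' := r + dr
      let c' := c + dc
      pvRunLoopB grid dr dc fuel r' c' (if pvCell grid r' c' = some "G" then count + 1 else count)
    else count

def pvRunB (row col : Int) (grid : List (List String)) (dr dc : Int) : Int :=
  pvRunLoopB grid dr dc (grid.length + (grid.headD []).length + 1) row col 0

def calc_max_area_alt (row : Int) (col : Int) (grid : List (List String)) : List (Int × (List (Int × Int))) :=
  let left := pvRunB row col grid 0 (-1)
  let right := pvRunB row col grid 0 1
  let bottom := pvRunB row col grid (-1) 0
  let top := pvRunB row col grid 1 0
  let run_length := min (min (min left right) top) bottom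
  let res := (PySem.List.pyRange 0 (run_length + 1) 1).foldl
    (fun st i =>
      (st.1 ++ [(1 + 4 * i, st.2 ++ [(row, col)])],
       st.2 ++ [(row, col + i + 1), (row, col - i - 1), (row + i + 1, col), (row - i - 1, col)]))
    ([], [])
  res.1

-- ===== PRECONDITION & SPEC =====
-- Pre_ excludes the inputs on which Python A raises IndexError (both Pythons raise on the
-- same inputs): grid = [] with col ≥ 1 (len(grid[0])), or a walk stepping onto a cell missing
-- from a ragged row.  An access can only happen when the center (row,col) lies in the interior
-- band; the walks then stay in row `row` (columns 0..m-1) and in column `col` (rows 0..n-1),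
-- so when the center cell is 'G' Pre_ requires exactly those cells to exist; the precise set of
-- visited cells depends on where the 'G's stop, so this conservatively also excludes a few
-- ragged grids whose short cells the walks stop just before (see the cited example).
def Pre_calc_max_area (row : Int) (col : Int) (grid : List (List String)) : Prop :=
  (1 ≤ col → grid ≠ []) ∧
  ((1 ≤ row ∧ row ≤ (grid.length : Int) - 2 ∧ 1 ≤ col ∧ col ≤ ((grid.headD []).length : Int) - 2) →
    col < (((PySem.List.pyGet? grid row).getD []).length : Int) ∧
    (pvCell grid row col = some "G" →
      ((grid.headD []).length : Int) ≤ (((PySem.List.pyGet? grid row).getD []).length : Int) ∧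
      ∀ rw ∈ grid, col < (rw.length : Int)))
instance (row : Int) (col : Int) (grid : List (List String)) : Decidable (Pre_calc_max_area row col grid) := by unfold Pre_calc_max_area; infer_instance

def pvWitness_calc_max_area : Int × Int × List (List String) :=
  (1, 1, [["G","G","G"],["G","G","G"],["G","G","G"]])

def Spec_calc_max_area (row : Int) (col : Int) (grid : List (List String)) (out : List (Int × (List (Int × Int)))) : Prop := out = calc_max_area_alt row col grid
instance (row : Int) (col : Int) (grid : List (List String)) (out : List (Int × (List (Int × Int)))) : Decidable (Spec_calc_max_area row col grid out) := by unfold Spec_calc_max_area; infer_instance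

-- ===== CLAIM (what is proved, stated in full; the proofs are below) =====
def Claim_equal_calc_max_area : Prop := ∀ (row : Int) (col : Int) (grid : List (List String)), Dom_calc_max_area row col grid → Pre_calc_max_area row col grid → Spec_calc_max_area row col grid (calc_max_area row col grid)

-- ===== LEMMAS AND PROOFS =====

-- the two walkers agree whenever the direction string resolves to the offset (dr,dc)
theorem pvLoop_eq (grid : List (List String)) (dir : String) (dr dc : Int)
    (h : ∀ r c : Int,
      (if dir == "left" then (r, c - 1)
       else if dir == "right" then (r, c + 1)
       else if dir == "top" then (r + 1, c)
       else if dir == "bottom" then (r - 1, c)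
       else (r, c)) = (r + dr, c + dc)) :
    ∀ (fuel : Nat) (r c count : Int),
      pvMaxRunLoopA grid dir fuel r c count = pvRunLoopB grid dr dc fuel r c count := by
  intro fuel
  induction fuel with
  | zero => intro r c count; rfl
  | succ f ih =>
    intro r c count
    simp only [pvMaxRunLoopA, pvRunLoopB, h]
    by_cases hc : 1 ≤ c ∧ c ≤ ((grid.headD []).length : Int) - 2 ∧ 1 ≤ r ∧ r ≤ (grid.length : Int) - 2 ∧ pvCell grid r c = some "G"
    · rw [if_pos (by obtain ⟨h1, h2, h3, h4, h5⟩ := hc; exact ⟨by omega, by omega, by omega, by omega, h5⟩),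
        if_pos hc]
      exact ih _ _ _
    · rw [if_neg (by intro ⟨h1, h2, h3, h4, h5⟩; exact hc ⟨by omega, by omega, by omega, by omega, h5⟩),
        if_neg hc]

theorem pvRunB_ge (grid : List (List String)) (dr dc : Int) :
    ∀ (fuel : Nat) (r c count : Int), count ≤ pvRunLoopB grid dr dc fuel r c count := by
  intro fuel
  induction fuel with
  | zero => intro r c count; exact le_refl _
  | succ f ih =>
    intro r c count
    simp only [pvRunLoopB]
    split
    · exact le_trans (by split <;> omega) (ih _ _ _)
    · exact le_refl _

-- the accumulated arm list after processing i = 0 .. n-1 of B's loop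
def pvArms (row col : Int) : Nat → List (Int × Int)
  | 0 => []
  | n+1 => pvArms row col n ++
      [(row, col + (n+1 : Nat)), (row, col - (n+1 : Nat)), (row + (n+1 : Nat), col), (row - (n+1 : Nat), col)]

theorem pvBuild_eq (row col : Int) : ∀ n : Nat,
    pvBuildIndexList row col (n : Int) = pvArms row col n ++ [(row, col)] := by
  intro n
  induction n with
  | zero =>
    simp [pvBuildIndexList, pvArms, PySem.List.pyRange_one_eq_nil]
  | succ n ih =>
    have hcast : ((n + 1 : Nat) : Int) + 1 = ((n : Int) + 1) + 1 := by push_cast; ring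
    have hsplit : PySem.List.pyRange 1 ((n + 1 : Nat) + 1) 1
        = PySem.List.pyRange 1 ((n : Int) + 1) 1 ++ [(n : Int) + 1] := by
      rw [hcast, PySem.List.pyRange_one_succ_right (by omega)]
    simp only [pvBuildIndexList] at ih ⊢
    have hfold : (PySem.List.pyRange 1 ((n : Int) + 1) 1).foldl
        (fun acc i => acc ++ [(row, col + i), (row, col - i), (row + i, col), (row - i, col)]) []
        = pvArms row col n := List.append_cancel_right ih
    rw [hsplit, List.foldl_append]
    simp only [List.foldl, hfold, pvArms]
    push_cast
    simp [List.append_assoc]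

theorem pvMainLoop_eq (row col : Int) : ∀ n : Nat,
    (PySem.List.pyRange 0 ((n : Int) + 1) 1).foldl
      (fun st i =>
        (st.1 ++ [(1 + 4 * i, st.2 ++ [(row, col)])],
         st.2 ++ [(row, col + i + 1), (row, col - i - 1), (row + i + 1, col), (row - i - 1, col)]))
      (([], []) : List (Int × List (Int × Int)) × List (Int × Int))
    = ((PySem.List.pyRange 0 ((n : Int) + 1) 1).foldl
        (fun acc i => acc ++ [(1 + i * 4, pvBuildIndexList row col i)]) [],
       pvArms row col (n + 1)) := by
  intro n
  induction n with
  | zero =>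
    rw [PySem.List.pyRange_one_cons (by omega), PySem.List.pyRange_one_eq_nil (by omega)]
    have hb := pvBuild_eq row col 0
    simp only [Nat.cast_zero] at hb
    simp [hb, pvArms]
  | succ n ih =>
    have hcast : ((n + 1 : Nat) : Int) + 1 = ((n : Int) + 1) + 1 := by push_cast; ring
    have hsplit : PySem.List.pyRange 0 ((n + 1 : Nat) + 1) 1
        = PySem.List.pyRange 0 ((n : Int) + 1) 1 ++ [(n : Int) + 1] := by
      rw [hcast, PySem.List.pyRange_one_succ_right (by omega)]
    have hb : pvBuildIndexList row col ((n : Int) + 1) = pvArms row col (n + 1) ++ [(row, col)] := by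
      have h := pvBuild_eq row col (n + 1)
      rwa [show ((n + 1 : Nat) : Int) = (n : Int) + 1 by push_cast; ring] at h
    rw [hsplit, List.foldl_append, List.foldl_append, ih]
    simp only [List.foldl, Prod.mk.injEq]
    refine ⟨?_, ?_⟩
    · rw [hb, show (1 : Int) + 4 * ((n : Int) + 1) = 1 + ((n : Int) + 1) * 4 by ring]
    · simp only [pvArms]
      push_cast
      ring_nf

theorem pvRun_same (row col : Int) (grid : List (List String)) :
    pvMaxRunA row col grid "left" = pvRunB row col grid 0 (-1)
    ∧ pvMaxRunA row col grid "right" = pvRunB row col grid 0 1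
    ∧ pvMaxRunA row col grid "top" = pvRunB row col grid 1 0
    ∧ pvMaxRunA row col grid "bottom" = pvRunB row col grid (-1) 0 := by
  refine ⟨?_, ?_, ?_, ?_⟩ <;>
    exact pvLoop_eq grid _ _ _ (fun r c => by simp <;> omega) _ _ _ _

-- ===== VERDICT (by name: the statement is the Claim_ definition above) =====
theorem calc_max_area_spec : Claim_equal_calc_max_area := by
  intro row col grid _ _
  show calc_max_area row col grid = calc_max_area_alt row col grid
  obtain ⟨hl, hr, ht, hb⟩ := pvRun_same row col grid
  simp only [calc_max_area, calc_max_area_alt, hl, hr, ht, hb]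
  set rl := min (min (min (pvRunB row col grid 0 (-1)) (pvRunB row col grid 0 1)) (pvRunB row col grid 1 0)) (pvRunB row col grid (-1) 0) with hrl
  have h0 : 0 ≤ rl := by
    have h1 := pvRunB_ge grid 0 (-1) (grid.length + (grid.headD []).length + 1) row col 0
    have h2 := pvRunB_ge grid 0 1 (grid.length + (grid.headD []).length + 1) row col 0
    have h3 := pvRunB_ge grid 1 0 (grid.length + (grid.headD []).length + 1) row col 0
    have h4 := pvRunB_ge grid (-1) 0 (grid.length + (grid.headD []).length + 1) row col 0
    simp only [hrl, pvRunB, le_min_iff]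
    exact ⟨⟨⟨h1, h2⟩, h3⟩, h4⟩
  obtain ⟨m, hm⟩ : ∃ m : Nat, rl = (m : Int) := ⟨rl.toNat, (Int.toNat_of_nonneg h0).symm⟩
  rw [hm, pvMainLoop_eq row col m]
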